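-- pv_equiv track=rewrite | github.com/Hanna0036/230066-Kripto25 | Hill-Cipher/hillcipher.py | inverseMatriksKunci
-- ===== SOURCE A (Python) =====
-- def modInverse(a, m=26):
--     a = a % m
--     for x in range(1, m):
--         if (a * x) % m == 1:
--             return x
--     return None
--
-- def inverseMatriksKunci(matrix):
--     a, b = matrix[0]
--     c, d = matrix[1]
--
--     det = (a*d - b*c) % 26
--     det_inv = modInverse(det, 26)
--     if det_inv is None:
--         raise ValueError("Matriks kunci tidak punya invers mod 26")
--
--     adj = [[d, -b],
--            [-c, a]]
--
--     inv_matrix = [[(det_inv * adj[i][j]) % 26 for j in range(2)] for i in range(2)]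
--     return inv_matrix
-- ===== SOURCE B (Python) =====
-- def _egcd(a, b):
--     # iterative extended Euclid: returns (g, x, y) with a*x + b*y == g
--     x0, x1, y0, y1 = 1, 0, 0, 1
--     while b:
--         q = a // b
--         a, b = b, a - q * b
--         x0, x1 = x1, x0 - q * x1
--         y0, y1 = y1, y0 - q * y1
--     return a, x0, y0
--
-- def inverseMatriksKunci(matrix):
--     a, b = matrix[0]
--     c, d = matrix[1]
--     det = (a * d - b * c) % 26
--     g, x, _ = _egcd(det, 26)
--     if g != 1:
--         raise ValueError("Matriks kunci tidak punya invers mod 26")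
--     inv = x % 26
--     return [[(d * inv) % 26, (-b * inv) % 26],
--             [(-c * inv) % 26, (a * inv) % 26]]
-- ===== Notes on version B (the rewrite author's own statement) =====
-- stated objective: alternative
-- what changed: The modular inverse is computed by an iterative extended Euclidean algorithm (Bezout coefficient reduced mod 26) instead of a brute-force scan over range(1,26), and the scaled adjugate is built as a direct 2x2 literal instead of a nested range comprehension.
import Mathlib
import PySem

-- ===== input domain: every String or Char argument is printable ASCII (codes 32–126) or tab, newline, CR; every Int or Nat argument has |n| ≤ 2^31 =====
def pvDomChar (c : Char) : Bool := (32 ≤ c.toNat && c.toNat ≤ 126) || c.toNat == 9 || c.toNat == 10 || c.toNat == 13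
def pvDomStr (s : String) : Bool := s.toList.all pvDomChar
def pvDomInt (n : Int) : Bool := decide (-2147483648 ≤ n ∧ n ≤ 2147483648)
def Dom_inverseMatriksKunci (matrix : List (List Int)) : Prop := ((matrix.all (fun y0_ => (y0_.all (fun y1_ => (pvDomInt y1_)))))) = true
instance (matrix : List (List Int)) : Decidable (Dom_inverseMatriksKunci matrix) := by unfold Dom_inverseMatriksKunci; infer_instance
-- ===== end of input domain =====

-- B replaces the brute-force search for the modular inverse by the extended Euclidean
-- algorithm and builds the scaled adjugate as a direct 2x2 literal (alternative, not faster).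


-- shared helper (used by both ports): the 'a, b = matrix[0]; c, d = matrix[1]' unpacking;
-- none is exactly where Python's unpacking raises
def pvRows? (matrix : List (List Int)) : Option (Int × Int × Int × Int) :=
  match matrix with
  | (a :: b :: []) :: (c :: d :: []) :: _ => some (a, b, c, d)
  | _ => none

-- ===== PORT A =====
-- modInverse(a, m): brute-force scan 'for x in range(1, m)'
def modInverseA (a m : Int) : Option Int :=
  let a2 := PySem.Int.mod a m
  (PySem.List.pyRange 1 m 1).find? (fun x => PySem.Int.mod (a2 * x) m == 1)

def inverseMatriksKunci (matrix : List (List Int)) : List (List Int) :=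
  match pvRows? matrix with
  | none => []     -- unpacking matrix[0]/matrix[1] raises (excluded by Pre_)
  | some (a, b, c, d) =>
    let det := PySem.Int.mod (a * d - b * c) 26
    match modInverseA det 26 with
    | none => []   -- Python raises ValueError here (excluded by Pre_)
    | some detInv =>
      let adj := [[d, -b], [-c, a]]
      (PySem.List.pyRange 0 2 1).map (fun i =>
        (PySem.List.pyRange 0 2 1).map (fun j =>
          PySem.Int.mod (detInv * PySem.List.pyGetD (PySem.List.pyGetD adj i []) j 0) 26))

-- ===== PORT B =====
-- iterative extended Euclid with a fuel counter (fuel only makes the recursion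
-- structural; b.natAbs + 1 steps always suffice since |b| strictly decreases)
def egcdGo (fuel : Nat) (a b x0 x1 y0 y1 : Int) : Int × Int × Int :=
  match fuel with
  | 0 => (a, x0, y0)
  | fuel + 1 =>
    if b ≠ 0 then
      let q := PySem.Int.floordiv a b
      egcdGo fuel b (a - q * b) x1 (x0 - q * x1) y1 (y0 - q * y1)
    else (a, x0, y0)

def egcd (a b : Int) : Int × Int × Int := egcdGo (b.natAbs + 1) a b 1 0 0 1

def inverseMatriksKunci_alt (matrix : List (List Int)) : List (List Int) :=
  (pvRows? matrix).elim [] (fun q =>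
    let a := q.1; let b := q.2.1; let c := q.2.2.1; let d := q.2.2.2
    let det := PySem.Int.mod (a * d - b * c) 26
    let r := egcd det 26
    if r.1 ≠ 1 then []   -- raise ValueError (excluded by Pre_)
    else
      let inv := PySem.Int.mod r.2.1 26
      [[PySem.Int.mod (d * inv) 26, PySem.Int.mod (-b * inv) 26],
       [PySem.Int.mod (-c * inv) 26, PySem.Int.mod (a * inv) 26]])

-- ===== PRECONDITION & SPEC =====
-- Pre_ excludes exactly the inputs where A raises: a matrix whose first two rows do not
-- both have exactly two entries (unpacking raises), and a determinant not coprime to 26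
-- (A raises ValueError).
def Pre_inverseMatriksKunci (matrix : List (List Int)) : Prop :=
  2 ≤ matrix.length ∧ (matrix.getD 0 []).length = 2 ∧ (matrix.getD 1 []).length = 2 ∧
  Int.gcd ((matrix.getD 0 []).getD 0 0 * (matrix.getD 1 []).getD 1 0
           - (matrix.getD 0 []).getD 1 0 * (matrix.getD 1 []).getD 0 0) 26 = 1
instance (matrix : List (List Int)) : Decidable (Pre_inverseMatriksKunci matrix) := by
  unfold Pre_inverseMatriksKunci; infer_instance

def pvWitness_inverseMatriksKunci : List (List Int) := [[1, 0], [0, 1]]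

def Spec_inverseMatriksKunci (matrix : List (List Int)) (out : List (List Int)) : Prop := out = inverseMatriksKunci_alt matrix
instance (matrix : List (List Int)) (out : List (List Int)) : Decidable (Spec_inverseMatriksKunci matrix out) := by unfold Spec_inverseMatriksKunci; infer_instance

-- ===== CLAIM (what is proved, stated in full; the proofs are below) =====
def Claim_equal_inverseMatriksKunci : Prop := ∀ (matrix : List (List Int)), Dom_inverseMatriksKunci matrix → Pre_inverseMatriksKunci matrix → Spec_inverseMatriksKunci matrix (inverseMatriksKunci matrix)

-- ===== LEMMAS AND PROOFS =====

-- For each of the 26 residues coprime to 26, A's brute-force scan finds exactly the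
-- Bezout coefficient of B's extended Euclid, reduced mod 26, and B's gcd is 1.
lemma key_inv : ∀ t : Fin 26, Int.gcd (t : Int) 26 = 1 →
    (egcd (t : Int) 26).1 = 1 ∧
    modInverseA (t : Int) 26 = some (PySem.Int.mod ((egcd (t : Int) 26).2.1) 26) := by
  decide

lemma det_fin (x : Int) :
    ∃ t : Fin 26, PySem.Int.mod x 26 = (t : Int) := by
  have h0 : 0 ≤ PySem.Int.mod x 26 := PySem.Int.mod_nonneg x (by norm_num)
  have h1 : PySem.Int.mod x 26 < 26 := PySem.Int.mod_lt x (by norm_num)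
  exact ⟨⟨(PySem.Int.mod x 26).toNat, by omega⟩, by simp; omega⟩

lemma gcd_mod_26 (x : Int) : Int.gcd (PySem.Int.mod x 26) 26 = Int.gcd x 26 := by
  rw [PySem.Int.mod_eq_emod_of_pos (by norm_num : (0:Int) < 26)]
  exact Int.gcd_emod x 26

-- ===== VERDICT (by name: the statement is the Claim_ definition above) =====
theorem inverseMatriksKunci_spec : Claim_equal_inverseMatriksKunci := by
  intro matrix _ pre
  obtain ⟨hlen, h0, h1, hgcd⟩ := pre
  match matrix with
  | (a :: b :: []) :: (c :: d :: []) :: rest =>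
    simp only [List.getD, List.getElem?_cons_zero, List.getElem?_cons_succ, Option.getD_some] at hgcd
    obtain ⟨t, ht⟩ := det_fin (a * d - b * c)
    have hg : Int.gcd (t : Int) 26 = 1 := by
      rw [← ht, gcd_mod_26]; exact hgcd
    obtain ⟨hg1, hfind⟩ := key_inv t hg
    show inverseMatriksKunci _ = inverseMatriksKunci_alt _
    unfold inverseMatriksKunci inverseMatriksKunci_alt
    simp only [pvRows?, Option.elim, ht, hfind, hg1, ne_eq, not_true_eq_false, if_false]
    have hpr : PySem.List.pyRange 0 2 1 = [0, 1] := by decide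
    simp only [hpr, List.map_cons, List.map_nil]
    norm_num [PySem.List.pyGetD_ofNat', PySem.List.pyGetD_zero_cons]
    refine ⟨⟨?_, ?_⟩, ?_, ?_⟩ <;> ring_nf
  | [] => simp at hlen
  | [_] => simp at hlen
  | (a :: b :: e :: r0) :: _ :: _ => simp [List.getD] at h0
  | [] :: _ :: _ => simp [List.getD] at h0
  | [_] :: _ :: _ => simp [List.getD] at h0
  | _ :: (c :: d :: e :: r1) :: _ => simp [List.getD] at h1
  | _ :: [] :: _ => simp [List.getD] at h1
  | _ :: [_] :: _ => simp [List.getD] at h1
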